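-- pv_equiv track=rewrite | github.com/msanchezzg/AdventOfCode | AdventOfCode2019/day4/day4-2.py | adyacente
-- ===== SOURCE A (Python) =====
-- def adyacente(lista):
--     parcial = []
--     total = []
--
--     i = 0
--     while(i < len(lista)):
--         n = lista[i]
--
--         while(i < len(lista) and lista[i] == n):
--             parcial.append(n)
--             i += 1
--
--         total.append(parcial)
--         parcial = []
--
--     return any(len(parcial) == 2 for parcial in total)
-- ===== SOURCE B (Python) =====
-- def adyacente(lista):
--     prev = None
--     n = len(lista)
--     for i in range(n - 1):
--         a, b = lista[i], lista[i + 1]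
--         if a == b and prev != a and (i + 2 >= n or lista[i + 2] != a):
--             return True
--         prev = a
--     return False
-- ===== Notes on version B (the rewrite author's own statement) =====
-- stated objective: faster
-- what changed: Replaces the run-grouping pass that materialises a list of run sublists (then scans them for a length-2 group) with a single sliding-window scan over adjacent pairs carrying only the previous element, with early return on the first exact-length-2 run.
import Mathlib
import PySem

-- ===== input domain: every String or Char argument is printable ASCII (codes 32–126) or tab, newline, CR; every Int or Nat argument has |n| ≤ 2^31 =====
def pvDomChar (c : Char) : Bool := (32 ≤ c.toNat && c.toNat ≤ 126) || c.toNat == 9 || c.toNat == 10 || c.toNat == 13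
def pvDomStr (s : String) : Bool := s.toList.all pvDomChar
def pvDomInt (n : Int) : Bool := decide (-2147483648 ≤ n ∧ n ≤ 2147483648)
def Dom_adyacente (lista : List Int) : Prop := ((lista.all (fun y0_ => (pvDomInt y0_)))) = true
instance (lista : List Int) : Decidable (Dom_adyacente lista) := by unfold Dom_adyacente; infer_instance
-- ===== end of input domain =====

-- B replaces A's pass that groups the list into run sublists by a one-pass
-- sliding-window scan (pair + neighbours, carrying only the previous element).

-- ===== PORT A =====
-- inner while loop: consume the leading elements equal to n, returning (parcial, rest)
def takeRun (n : Int) : List Int → List Int × List Int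
  | [] => ([], [])
  | x :: xs => if x = n then let p := takeRun n xs; (x :: p.1, p.2) else ([], x :: xs)

theorem takeRun_snd_length_le (n : Int) (l : List Int) : (takeRun n l).2.length ≤ l.length := by
  induction l with
  | nil => simp [takeRun]
  | cons x xs ih =>
    simp only [takeRun]
    split
    · exact Nat.le_succ_of_le ih
    · simp

-- outer while loop: build `total`, the list of maximal runs
def groupsA : List Int → List (List Int)
  | [] => []
  | x :: xs =>
    let p := takeRun x xs
    (x :: p.1) :: groupsA p.2
  termination_by l => l.length
  decreasing_by
    simpa using Nat.lt_succ_of_le (takeRun_snd_length_le x xs)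

def adyacente (lista : List Int) : Bool :=
  (groupsA lista).any (fun parcial => parcial.length == 2)

-- ===== PORT B =====
-- the loop body of Source B: window (a, b, rest-head) with the carried previous element
def altGo (prev : Option Int) : List Int → Bool
  | a :: b :: rest =>
    if a = b ∧ prev ≠ some a ∧ rest.head? ≠ some a then true
    else altGo (some a) (b :: rest)
  | _ => false

def adyacente_alt (lista : List Int) : Bool := altGo none lista

-- ===== PRECONDITION & SPEC =====
def Spec_adyacente (lista : List Int) (out : Bool) : Prop := out = adyacente_alt lista
instance (lista : List Int) (out : Bool) : Decidable (Spec_adyacente lista out) := by unfold Spec_adyacente; infer_instance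

-- ===== CLAIM (what is proved, stated in full; the proofs are below) =====
def Claim_equal_adyacente : Prop := ∀ (lista : List Int), Dom_adyacente lista → Spec_adyacente lista (adyacente lista)

-- ===== LEMMAS AND PROOFS =====

theorem takeRun_eq (n : Int) (l : List Int) :
    takeRun n l = (l.takeWhile (· == n), l.dropWhile (· == n)) := by
  induction l with
  | nil => simp [takeRun]
  | cons x xs ih =>
    by_cases h : x = n <;> simp [takeRun, h, ih]

-- inside a run, altGo just skips the repeated head
theorem altGo_skip (x : Int) (l : List Int) : altGo (some x) (x :: l) = altGo (some x) l := by
  cases l with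
  | nil => simp [altGo]
  | cons b rest => simp [altGo]

theorem altGo_dropWhile (x : Int) (l : List Int) :
    altGo (some x) l = altGo (some x) (l.dropWhile (· == x)) := by
  induction l with
  | nil => rfl
  | cons a as ih =>
    by_cases h : a = x
    · subst h; rw [altGo_skip, ih]; simp
    · simp [h]

-- when the carried prev does not match the head, it is irrelevant
theorem altGo_fresh (prev : Option Int) (b : Int) (rest : List Int) (h : prev ≠ some b) :
    altGo prev (b :: rest) = altGo none (b :: rest) := by
  cases rest with
  | nil => simp [altGo]
  | cons c r => simp [altGo, h]

theorem altGo_fresh' (x : Int) (l : List Int) (h : l.head? ≠ some x) :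
    altGo (some x) l = altGo none l := by
  cases l with
  | nil => rfl
  | cons b rest =>
    exact altGo_fresh (some x) b rest (by simpa using fun hb => h (by simp [hb]))

theorem head?_dropWhile_ne (x : Int) (l : List Int) :
    (l.dropWhile (· == x)).head? ≠ some x := by
  induction l with
  | nil => simp
  | cons a as ih =>
    by_cases h : a = x
    · simpa [List.dropWhile_cons, h] using ih
    · simp [h]

theorem adyacente_cons (x : Int) (xs : List Int) :
    adyacente (x :: xs) =
      (((xs.takeWhile (· == x)).length == 1 : Bool) || adyacente (xs.dropWhile (· == x))) := by
  simp only [adyacente, groupsA, takeRun_eq, List.any_cons]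
  simp

theorem main_lemma : ∀ (n : Nat) (l : List Int), l.length ≤ n → altGo none l = adyacente l := by
  intro n
  induction n with
  | zero =>
    intro l hl
    have : l = [] := List.eq_nil_of_length_eq_zero (Nat.le_zero.mp hl)
    subst this; simp [altGo, adyacente, groupsA]
  | succ n ih =>
    intro l hl
    match l with
    | [] => simp [altGo, adyacente, groupsA]
    | [x] => simp [altGo, adyacente, groupsA, takeRun]
    | x :: b :: rest =>
      by_cases hxb : x = b
      · subst hxb
        -- the surviving name of the repeated head is x
        by_cases hh : rest.head? = some x
        · -- run of length >= 3
          cases rest with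
          | nil => simp at hh
          | cons c r2 =>
            have hc : c = x := by simpa using hh
            subst hc
            -- after subst the repeated value is named c
            have hstep : altGo none (c :: c :: c :: r2) = altGo (some c) (c :: c :: r2) := by
              simp [altGo]
            rw [hstep, altGo_dropWhile]
            have hdw : (c :: c :: r2).dropWhile (· == c) = r2.dropWhile (· == c) := by
              simp
            rw [hdw]
            set d := r2.dropWhile (· == c) with hd
            have hdh : d.head? ≠ some c := head?_dropWhile_ne c r2
            rw [altGo_fresh' c d hdh]
            have hlen : d.length ≤ n := by
              have h1 : d.length ≤ r2.length := by
                rw [hd]; exact List.length_dropWhile_le _ _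
              have : r2.length + 3 ≤ n + 1 := by simpa using hl
              omega
            rw [ih d hlen, adyacente_cons]
            simp [hd]
        · -- run of exactly length 2
          have h2 : altGo none (x :: x :: rest) = true := by
            simp [altGo, hh]
          rw [h2, adyacente_cons]
          have htw : rest.takeWhile (· == x) = [] := by
            cases rest with
            | nil => rfl
            | cons c r =>
              have : ¬ (c = x) := fun hc => hh (by simp [hc])
              simp [this]
          simp [htw]
      · -- heads differ: both reduce to the tail
        have hstep : altGo none (x :: b :: rest) = altGo (some x) (b :: rest) := by
          simp [altGo, hxb]
        have hbx : ¬ b = x := fun h => hxb h.symm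
        rw [hstep, altGo_fresh (some x) b rest (by simpa using hxb),
            ih (b :: rest) (by simpa using Nat.le_of_succ_le_succ hl),
            adyacente_cons x (b :: rest)]
        simp [hbx]

-- ===== VERDICT (by name: the statement is the Claim_ definition above) =====
theorem adyacente_spec : Claim_equal_adyacente := by
  intro lista _
  unfold Spec_adyacente adyacente_alt
  exact (main_lemma lista.length lista (le_refl _)).symm
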